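-- pv_equiv track=rewrite | github.com/yskang/AlgorithmPractice | baekjoon/python/friday_13_16463.py | solution
-- ===== SOURCE A (Python) =====
-- normal_months = [31, 28, 31, 30, 31, 30, 31, 31, 30, 31, 30, 31]
--
-- yoon_months = [31, 29, 31, 30, 31, 30, 31, 31, 30, 31, 30, 31]
--
-- def is_yoon(year: int):
--     if year % 400 == 0:
--         return True
--     if year % 400 != 0 and year % 100 == 0:
--         return False
--     if year % 100 != 0 and year % 4 == 0:
--         return True
--     return False
--
-- def solution(end_year: int):
--     count = 0
--     day = 0
--     for year in range(2019, end_year+1):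
--         for month in yoon_months if is_yoon(year) else normal_months:
--             day = day + month
--             if ((day - month) + 13 - 4) % 7 == 0:
--                 count += 1
--     return count
-- ===== SOURCE B (Python) =====
-- # Fridays the 13th repeat with the 400-year Gregorian cycle (146097 days, divisible by 7):
-- # count full cycles in O(1) and loop only over the < 400 remaining years.
-- C400 = 688  # Fridays the 13th in the 400 years 2019..2418
--
-- def solution(end_year: int):
--     n = end_year - 2018  # number of years 2019..end_year
--     if n <= 0:
--         return 0
--     q, r = divmod(n, 400)
--     count = 0
--     day = 0
--     for year in range(2019, 2019 + r):
--         leap = year % 400 == 0 or (year % 100 != 0 and year % 4 == 0)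
--         for m in ([31, 29, 31, 30, 31, 30, 31, 31, 30, 31, 30, 31] if leap
--                   else [31, 28, 31, 30, 31, 30, 31, 31, 30, 31, 30, 31]):
--             if day % 7 == 5:
--                 count += 1
--             day += m
--     return q * C400 + count
-- ===== Notes on version B (the rewrite author's own statement) =====
-- stated objective: faster
-- what changed: B replaces A's year-by-year scan from 2019 to end_year with closed-form arithmetic on the 400-year Gregorian cycle (146097 days, divisible by 7): divmod gives the number of full cycles, multiplied by the constant 688 Fridays-the-13th per cycle, plus a loop over the at most 399 remaining years.
import Mathlib
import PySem

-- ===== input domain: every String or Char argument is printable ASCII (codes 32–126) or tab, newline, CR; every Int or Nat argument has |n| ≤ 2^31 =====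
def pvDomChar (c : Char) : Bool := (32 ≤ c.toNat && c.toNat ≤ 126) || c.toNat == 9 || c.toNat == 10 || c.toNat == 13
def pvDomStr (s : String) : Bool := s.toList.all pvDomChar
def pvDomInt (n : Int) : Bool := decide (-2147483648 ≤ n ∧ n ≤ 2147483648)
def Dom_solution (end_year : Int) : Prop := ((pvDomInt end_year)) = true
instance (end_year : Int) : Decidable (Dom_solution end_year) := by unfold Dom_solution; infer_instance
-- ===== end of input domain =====

-- B replaces A's year-by-year scan with 400-year-cycle arithmetic (O(1) full cycles + a <400-year remainder loop).

-- ===== PORT A =====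
def normal_months : List Int := [31, 28, 31, 30, 31, 30, 31, 31, 30, 31, 30, 31]
def yoon_months : List Int := [31, 29, 31, 30, 31, 30, 31, 31, 30, 31, 30, 31]

def is_yoon (year : Int) : Bool :=
  if PySem.Int.mod year 400 == 0 then true
  else if PySem.Int.mod year 400 != 0 && PySem.Int.mod year 100 == 0 then false
  else if PySem.Int.mod year 100 != 0 && PySem.Int.mod year 4 == 0 then true
  else false

def stepA (st : Int × Int) (month : Int) : Int × Int :=
  let day := st.2 + month
  (if PySem.Int.mod ((day - month) + 13 - 4) 7 == 0 then st.1 + 1 else st.1, day)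

def yearA (st : Int × Int) (year : Int) : Int × Int :=
  (if is_yoon year then yoon_months else normal_months).foldl stepA st

def solution (end_year : Int) : Int :=
  ((PySem.List.pyRange 2019 (end_year + 1) 1).foldl yearA (0, 0)).1

-- ===== PORT B =====
def C400 : Int := 688  -- Fridays the 13th in the 400 years 2019..2418

def stepB (st : Int × Int) (m : Int) : Int × Int :=
  (if PySem.Int.mod st.2 7 == 5 then st.1 + 1 else st.1, st.2 + m)

def yearB (st : Int × Int) (year : Int) : Int × Int :=
  (if PySem.Int.mod year 400 == 0 || (PySem.Int.mod year 100 != 0 && PySem.Int.mod year 4 == 0)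
    then [31, 29, 31, 30, 31, 30, 31, 31, 30, 31, 30, 31]
    else [31, 28, 31, 30, 31, 30, 31, 31, 30, 31, 30, 31]).foldl stepB st

def solution_alt (end_year : Int) : Int :=
  let n := end_year - 2018
  if n ≤ 0 then 0
  else
    let q := PySem.Int.floordiv n 400
    let r := PySem.Int.mod n 400
    q * C400 + ((PySem.List.pyRange 2019 (2019 + r) 1).foldl yearB (0, 0)).1

-- ===== PRECONDITION & SPEC =====
def Spec_solution (end_year : Int) (out : Int) : Prop := out = solution_alt end_year
instance (end_year : Int) (out : Int) : Decidable (Spec_solution end_year out) := by unfold Spec_solution; infer_instance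

-- ===== CLAIM (what is proved, stated in full; the proofs are below) =====
def Claim_equal_solution : Prop := ∀ (end_year : Int), Dom_solution end_year → Spec_solution end_year (solution end_year)

-- ===== LEMMAS AND PROOFS =====

-- abstract count of 13th-Fridays over one month list, from day offset d
def cM (d : Int) : List Int → Int
  | [] => 0
  | m :: ms => (if PySem.Int.mod d 7 == 5 then 1 else 0) + cM (d + m) ms

def months (y : Int) : List Int := if is_yoon y then yoon_months else normal_months

def G (y d : Int) : Nat → Int
  | 0 => 0
  | n + 1 => cM d (months y) + G (y + 1) (d + (months y).sum) n

def S (y : Int) : Nat → Int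
  | 0 => 0
  | n + 1 => (months y).sum + S (y + 1) n

theorem innerA (ms : List Int) : ∀ (c d : Int),
    ms.foldl stepA (c, d) = (c + cM d ms, d + ms.sum) := by
  induction ms with
  | nil => intro c d; simp [cM]
  | cons m ms ih =>
    intro c d
    have hmod : ∀ x : Int, PySem.Int.mod x 7 = x % 7 :=
      fun x => PySem.Int.mod_eq_emod_of_pos (by norm_num)
    have hc : ((d + m - m + 13 - 4) % 7 == 0) = (d % 7 == 5) := by
      rw [Bool.eq_iff_iff]; simp only [beq_iff_eq]; omega
    simp only [List.foldl_cons, stepA, cM, ih, hmod, hc, List.sum_cons]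
    split <;> (rw [Prod.mk.injEq]; exact ⟨by ring, by ring⟩)

theorem innerB (ms : List Int) : ∀ (c d : Int),
    ms.foldl stepB (c, d) = (c + cM d ms, d + ms.sum) := by
  induction ms with
  | nil => intro c d; simp [cM]
  | cons m ms ih =>
    intro c d
    simp only [List.foldl_cons, stepB, cM, ih, List.sum_cons]
    split <;> (rw [Prod.mk.injEq]; exact ⟨by ring, by ring⟩)

theorem yoon_eq (y : Int) :
    (PySem.Int.mod y 400 == 0 || (PySem.Int.mod y 100 != 0 && PySem.Int.mod y 4 == 0)) = is_yoon y := by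
  unfold is_yoon
  have e1 : PySem.Int.mod y 400 = y % 400 := PySem.Int.mod_eq_emod_of_pos (by norm_num)
  have e2 : PySem.Int.mod y 100 = y % 100 := PySem.Int.mod_eq_emod_of_pos (by norm_num)
  have e3 : PySem.Int.mod y 4 = y % 4 := PySem.Int.mod_eq_emod_of_pos (by norm_num)
  rw [e1, e2, e3]
  by_cases h1 : y % 400 = 0 <;>
    by_cases h2 : y % 100 = 0 <;>
      by_cases h3 : y % 4 = 0 <;>
        simp [h1, h2, h3]

theorem yearA_eq (st : Int × Int) (y : Int) :
    yearA st y = (st.1 + cM st.2 (months y), st.2 + (months y).sum) := by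
  unfold yearA months; exact innerA _ st.1 st.2

theorem yearB_eq (st : Int × Int) (y : Int) :
    yearB st y = (st.1 + cM st.2 (months y), st.2 + (months y).sum) := by
  unfold yearB months
  rw [yoon_eq]
  have : (if is_yoon y then ([31, 29, 31, 30, 31, 30, 31, 31, 30, 31, 30, 31] : List Int)
      else [31, 28, 31, 30, 31, 30, 31, 31, 30, 31, 30, 31])
      = (if is_yoon y then yoon_months else normal_months) := by
    unfold yoon_months normal_months; rfl
  rw [this]
  exact innerB _ st.1 st.2

theorem foldOut (f : Int × Int → Int → Int × Int)
    (hf : ∀ st y, f st y = (st.1 + cM st.2 (months y), st.2 + (months y).sum)) :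
    ∀ (n : Nat) (a c d : Int),
    (PySem.List.pyRange a (a + n) 1).foldl f (c, d) = (c + G a d n, d + S a n) := by
  intro n
  induction n with
  | zero => intro a c d; simp [G, S]
  | succ n ih =>
    intro a c d
    have hcons : PySem.List.pyRange a (a + (n + 1 : Nat)) 1
        = a :: PySem.List.pyRange (a + 1) (a + (n + 1 : Nat)) 1 :=
      PySem.List.pyRange_one_cons (by push_cast; omega)
    have harg : (a : Int) + (n + 1 : Nat) = (a + 1) + (n : Nat) := by push_cast; ring
    rw [hcons, List.foldl_cons, hf, harg, ih]
    simp only [G, S, Prod.mk.injEq]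
    exact ⟨by ring, by ring⟩

theorem cM_mod (ms : List Int) : ∀ d d' : Int, d % 7 = d' % 7 → cM d ms = cM d' ms := by
  induction ms with
  | nil => intro d d' _; rfl
  | cons m ms ih =>
    intro d d' h
    have hmod : ∀ x : Int, PySem.Int.mod x 7 = x % 7 :=
      fun x => PySem.Int.mod_eq_emod_of_pos (by norm_num)
    unfold cM
    rw [hmod, hmod, h, ih (d + m) (d' + m) (by omega)]

theorem G_mod : ∀ (n : Nat) (y d d' : Int), d % 7 = d' % 7 → G y d n = G y d' n := by
  intro n
  induction n with
  | zero => intro y d d' _; rfl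
  | succ n ih =>
    intro y d d' h
    unfold G
    rw [cM_mod _ d d' h, ih (y + 1) (d + (months y).sum) (d' + (months y).sum) (by omega)]

theorem months_400 (y : Int) : months (y + 400) = months y := by
  have hmod : ∀ (x k : Int), 0 < k → PySem.Int.mod x k = x % k :=
    fun x k hk => PySem.Int.mod_eq_emod_of_pos hk
  unfold months is_yoon
  rw [hmod _ 400 (by norm_num), hmod _ 400 (by norm_num), hmod _ 100 (by norm_num),
      hmod _ 100 (by norm_num), hmod _ 4 (by norm_num), hmod _ 4 (by norm_num)]
  have h1 : (y + 400) % 400 = y % 400 := by omega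
  have h2 : (y + 400) % 100 = y % 100 := by omega
  have h3 : (y + 400) % 4 = y % 4 := by omega
  rw [h1, h2, h3]

theorem G_400 : ∀ (n : Nat) (y d : Int), G (y + 400) d n = G y d n := by
  intro n
  induction n with
  | zero => intro y d; rfl
  | succ n ih =>
    intro y d
    unfold G
    rw [months_400]
    have : y + 400 + 1 = (y + 1) + 400 := by ring
    rw [this, ih (y + 1)]

theorem G_split : ∀ (m : Nat) (k : Nat) (y d : Int),
    G y d (m + k) = G y d m + G (y + m) (d + S y m) k := by
  intro m
  induction m with
  | zero => intro k y d; simp [G, S]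
  | succ m ih =>
    intro k y d
    have h2 : (y : Int) + (m + 1 : Nat) = (y + 1) + (m : Nat) := by push_cast; ring
    rw [show m + 1 + k = (m + k) + 1 from by omega]
    show cM d (months y) + G (y + 1) (d + (months y).sum) (m + k)
       = G y d (m + 1) + G (y + ((m + 1 : Nat) : Int)) (d + S y (m + 1)) k
    rw [ih k (y + 1) (d + (months y).sum), h2]
    show cM d (months y) + (G (y + 1) (d + (months y).sum) m
          + G (y + 1 + (m : Nat)) (d + (months y).sum + S (y + 1) m) k)
       = cM d (months y) + G (y + 1) (d + (months y).sum) m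
          + G (y + 1 + (m : Nat)) (d + ((months y).sum + S (y + 1) m)) k
    rw [show d + ((months y).sum + S (y + 1) m) = d + (months y).sum + S (y + 1) m from by ring]
    exact (add_assoc _ _ _).symm

set_option maxRecDepth 10000 in
theorem S_2019 : S 2019 400 = 146097 := by decide
set_option maxRecDepth 10000 in
theorem G400_val : G 2019 0 400 = 688 := by decide

theorem periodic : ∀ (q r : Nat), G 2019 0 (400 * q + r) = 688 * q + G 2019 0 r := by
  intro q
  induction q with
  | zero => intro r; simp
  | succ q ih =>
    intro r
    have h : 400 * (q + 1) + r = 400 + (400 * q + r) := by ring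
    rw [h, G_split 400 (400 * q + r) 2019 0, G400_val, S_2019]
    have h2 : (2019 : Int) + (400 : Nat) = 2019 + 400 := by norm_num
    rw [h2, G_400]
    rw [G_mod (400 * q + r) 2019 (0 + 146097) 0 (by omega), ih]
    push_cast; ring

-- ===== VERDICT (by name: the statement is the Claim_ definition above) =====
theorem solution_spec : Claim_equal_solution := by
  intro e _
  unfold Spec_solution solution solution_alt
  by_cases h : e - 2018 ≤ 0
  · have hempty : PySem.List.pyRange 2019 (e + 1) 1 = [] := by
      rw [PySem.List.pyRange_one]
      have : (e + 1 - 2019).toNat = 0 := by omega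
      rw [this]; rfl
    simp [hempty, h]
  · rw [not_le] at h
    set N : Nat := (e - 2018).toNat with hN
    have hNe : (e - 2018 : Int) = (N : Int) := by omega
    have hNpos : 1 ≤ N := by omega
    have hend : (e + 1 : Int) = 2019 + (N : Int) := by omega
    -- A side
    have hA : ((PySem.List.pyRange 2019 (e + 1) 1).foldl yearA (0, 0)).1 = G 2019 0 N := by
      rw [hend, foldOut yearA yearA_eq N 2019 0 0]
      simp
    -- B side
    have hq : PySem.Int.floordiv (e - 2018) 400 = ((N / 400 : Nat) : Int) := by
      rw [hNe]; exact_mod_cast PySem.Int.floordiv_natCast N 400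
    have hr : PySem.Int.mod (e - 2018) 400 = ((N % 400 : Nat) : Int) := by
      rw [hNe]; exact_mod_cast PySem.Int.mod_natCast N 400
    have hB : ((PySem.List.pyRange 2019 (2019 + PySem.Int.mod (e - 2018) 400) 1).foldl yearB (0, 0)).1
        = G 2019 0 (N % 400) := by
      rw [hr, foldOut yearB yearB_eq (N % 400) 2019 0 0]
      simp
    have hGA : G 2019 0 N = 688 * ((N / 400 : Nat) : Int) + G 2019 0 (N % 400) := by
      conv_lhs => rw [show N = 400 * (N / 400) + N % 400 from by omega]
      exact periodic (N / 400) (N % 400)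
    simp only [if_neg (by omega : ¬ (e - 2018 ≤ 0))]
    rw [hA, hB, hq, hGA]
    unfold C400
    ring
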